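-- pv_equiv track=rewrite | github.com/nickprock/ccat_reranker | rankers.py | litm
-- ===== SOURCE A (Python) =====
-- def litm(documents):
--     """
--     Function based on Haystack's LITM ranker:
--     https://github.com/deepset-ai/haystack/blob/main/haystack/nodes/ranker/lost_in_the_middle.py
--
--     Lost In The Middle is based on the paper https://arxiv.org/abs/2307.03172
--     Check it for mor details.
--
--
--     Parameters
--     ----------
--     documents: List of documents (the declarative working memories)
--
--     Returns
--     ----------
--     litm_docs: The same list but reordered
--     """
--     if len(documents) == 1:
--         return documents
--
--     document_index = list(range(len(documents)))
--     lost_in_the_middle_indices = [0]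
--
--     for doc_idx in document_index[1:]:
--         insertion_index = len(lost_in_the_middle_indices) // 2 + len(lost_in_the_middle_indices) % 2
--         lost_in_the_middle_indices.insert(insertion_index, doc_idx)
--         litm_docs = [documents[idx] for idx in lost_in_the_middle_indices]
--     return litm_docs
-- ===== SOURCE B (Python) =====
-- def litm(documents):
--     # Single pass: even positions go left-to-right, odd positions are
--     # collected and reversed onto the right half.
--     left = []
--     right = []
--     for i, doc in enumerate(documents):
--         (left if i % 2 == 0 else right).append(doc)
--     right.reverse()
--     return left + right
-- ===== Notes on version B (the rewrite author's own statement) =====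
-- stated objective: faster
-- what changed: Instead of repeatedly inserting into the middle of an index list and rebuilding the output list on every iteration (quadratic), B makes one pass splitting elements by position parity into a left (even, ascending) and a right (odd, later reversed) half and concatenates them once.
-- crash fix: On the empty list A raises UnboundLocalError (litm_docs is never assigned); B returns []. — e.g. on litm([]): A raises UnboundLocalError, B returns []
import Mathlib
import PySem

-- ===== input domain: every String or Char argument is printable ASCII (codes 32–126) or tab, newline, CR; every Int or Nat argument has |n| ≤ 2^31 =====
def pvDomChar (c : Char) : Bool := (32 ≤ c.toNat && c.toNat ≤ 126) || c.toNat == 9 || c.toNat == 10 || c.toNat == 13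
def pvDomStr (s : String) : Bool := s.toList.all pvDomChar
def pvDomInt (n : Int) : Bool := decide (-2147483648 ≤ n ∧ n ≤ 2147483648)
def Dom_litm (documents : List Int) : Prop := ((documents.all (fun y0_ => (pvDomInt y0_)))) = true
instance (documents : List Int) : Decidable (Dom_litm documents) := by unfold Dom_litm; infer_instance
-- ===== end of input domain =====

-- B replaces A's quadratic insert-into-the-middle loop by one parity-split pass (measured asymptotically faster).

-- ===== PORT A =====
-- Fold state: (lost_in_the_middle_indices, litm_docs); litm_docs is `none` until the loop
-- first assigns it (Python raises UnboundLocalError at the final `return` if it never does,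
-- i.e. on []; excluded by Pre_litm, and `.getD []` is never reached there).
def litm (documents : List Int) : List Int :=
  if PySem.List.len documents = 1 then documents
  else
    let documentIndex := PySem.List.pyRange 0 (PySem.List.len documents) 1
    let st := (PySem.List.slice documentIndex (some 1) none).foldl
      (fun (st : List Int × Option (List Int)) docIdx =>
        let insertionIndex := PySem.Int.floordiv (PySem.List.len st.1) 2
                              + PySem.Int.mod (PySem.List.len st.1) 2
        let lst := PySem.List.insert st.1 insertionIndex docIdx
        (lst, some (lst.map (fun idx => PySem.List.pyGetD documents idx 0))))
      ([0], none)
    st.2.getD []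

-- ===== PORT B =====
def litm_alt (documents : List Int) : List Int :=
  let st := (PySem.List.enumerate documents 0).foldl
    (fun (st : List Int × List Int) p =>
      if PySem.Int.mod p.1 2 = 0 then (st.1 ++ [p.2], st.2) else (st.1, st.2 ++ [p.2]))
    ([], [])
  st.1 ++ st.2.reverse

-- ===== PRECONDITION & SPEC =====
-- Pre_ excludes only the empty list, on which A raises UnboundLocalError (litm_docs unassigned).
def Pre_litm (documents : List Int) : Prop := documents ≠ []
instance (documents : List Int) : Decidable (Pre_litm documents) := by unfold Pre_litm; infer_instance
def pvWitness_litm : List Int := [3, 1, 4]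

-- On the empty list A raises UnboundLocalError (litm_docs is never assigned); B returns [].
def Raises_litm (documents : List Int) : Prop := documents = []
instance (documents : List Int) : Decidable (Raises_litm documents) := by unfold Raises_litm; infer_instance
def pvRaiseWitness_litm : List Int := []
def pvRaiseWitnessOut_litm : List Int := []

def Spec_litm (documents : List Int) (out : List Int) : Prop := out = litm_alt documents
instance (documents : List Int) (out : List Int) : Decidable (Spec_litm documents out) := by unfold Spec_litm; infer_instance

-- ===== CLAIM (what is proved, stated in full; the proofs are below) =====
def Claim_equal_litm : Prop := ∀ (documents : List Int), Dom_litm documents → Pre_litm documents → Spec_litm documents (litm documents)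
def Claim_raises_litm : Prop := (∀ (documents : List Int), Dom_litm documents → Raises_litm documents → ¬ Pre_litm documents) ∧ (Dom_litm (pvRaiseWitness_litm) ∧ Raises_litm (pvRaiseWitness_litm) ∧ litm_alt (pvRaiseWitness_litm) = pvRaiseWitnessOut_litm)

-- ===== LEMMAS AND PROOFS =====

-- (evens, odds): elements at even / odd positions
def pvSplit : List Int → List Int × List Int
  | [] => ([], [])
  | a :: l => ((pvSplit l).2.cons a, (pvSplit l).1)

-- index lists A's loop builds: even / odd naturals below n (as Int)
def pvEIdx : Nat → List Int
  | 0 => []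
  | n + 1 => if n % 2 = 0 then pvEIdx n ++ [(n : Int)] else pvEIdx n
def pvOIdx : Nat → List Int
  | 0 => []
  | n + 1 => if n % 2 = 1 then pvOIdx n ++ [(n : Int)] else pvOIdx n

lemma pvEIdx_length (n : Nat) : (pvEIdx n).length = (n + 1) / 2 := by
  induction n with
  | zero => rfl
  | succ n ih => unfold pvEIdx; split_ifs with h <;> simp [ih] <;> omega

lemma pvOIdx_length (n : Nat) : (pvOIdx n).length = n / 2 := by
  induction n with
  | zero => rfl
  | succ n ih => unfold pvOIdx; split_ifs with h <;> simp [ih] <;> omega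

lemma pvSplit_append_singleton (l : List Int) (a : Int) :
    pvSplit (l ++ [a]) =
      (if l.length % 2 = 0 then ((pvSplit l).1 ++ [a], (pvSplit l).2)
       else ((pvSplit l).1, (pvSplit l).2 ++ [a])) := by
  induction l with
  | nil => simp [pvSplit]
  | cons x l ih =>
    simp only [List.cons_append, pvSplit, ih]
    rcases Nat.even_or_odd l.length with h | h
    · have h0 : l.length % 2 = 0 := Nat.even_iff.mp h
      simp [h0, List.length_cons]
      omega
    · have h1 : l.length % 2 = 1 := Nat.odd_iff.mp h
      simp [h1, List.length_cons]
      omega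

-- A's index fold invariant
lemma pvFoldA (documents : List Int) (n : Nat) (hn : 1 ≤ n) :
    (PySem.List.pyRange 1 (n : Int) 1).foldl
      (fun (st : List Int × Option (List Int)) docIdx =>
        let insertionIndex := PySem.Int.floordiv (PySem.List.len st.1) 2
                              + PySem.Int.mod (PySem.List.len st.1) 2
        let lst := PySem.List.insert st.1 insertionIndex docIdx
        (lst, some (lst.map (fun idx => PySem.List.pyGetD documents idx 0))))
      ([0], none)
    = (pvEIdx n ++ (pvOIdx n).reverse,
       if n = 1 then none
       else some ((pvEIdx n ++ (pvOIdx n).reverse).map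
                    (fun idx => PySem.List.pyGetD documents idx 0))) := by
  induction n with
  | zero => omega
  | succ n ih =>
    rcases Nat.eq_or_lt_of_le hn with h1 | h1
    · -- n + 1 = 1
      have : n = 0 := by omega
      subst this
      simp [PySem.List.pyRange_one_eq_nil, pvEIdx, pvOIdx]
    · have hn1 : 1 ≤ n := by omega
      have hcast : ((n : Int) + 1) = ((n + 1 : Nat) : Int) := by push_cast; ring
      have hsplit : PySem.List.pyRange 1 ((n + 1 : Nat) : Int) 1
          = PySem.List.pyRange 1 (n : Int) 1 ++ [(n : Int)] := by
        rw [← hcast, PySem.List.pyRange_one_succ_right (by exact_mod_cast hn1)]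
      rw [hsplit, List.foldl_append, ih hn1]
      simp only [List.foldl_cons, List.foldl_nil]
      have hlen : (pvEIdx n ++ (pvOIdx n).reverse).length = n := by
        simp [pvEIdx_length, pvOIdx_length]; omega
      have hins : PySem.Int.floordiv (PySem.List.len (pvEIdx n ++ (pvOIdx n).reverse)) 2
            + PySem.Int.mod (PySem.List.len (pvEIdx n ++ (pvOIdx n).reverse)) 2
          = (((n + 1) / 2 : Nat) : Int) := by
        simp only [PySem.List.len_eq, hlen]
        rw [PySem.Int.floordiv_eq_ediv_of_pos (by omega : (0:Int) < 2),
            PySem.Int.mod_eq_emod_of_pos (by omega : (0:Int) < 2)]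
        omega
      have hle : (n + 1) / 2 ≤ (pvEIdx n ++ (pvOIdx n).reverse).length := by omega
      have htake : (pvEIdx n ++ (pvOIdx n).reverse).take ((n + 1) / 2) = pvEIdx n := by
        rw [show (n + 1) / 2 = (pvEIdx n).length from (pvEIdx_length n).symm]
        exact List.take_left
      have hdrop : (pvEIdx n ++ (pvOIdx n).reverse).drop ((n + 1) / 2) = (pvOIdx n).reverse := by
        rw [show (n + 1) / 2 = (pvEIdx n).length from (pvEIdx_length n).symm]
        exact List.drop_left
      have hinsert : PySem.List.insert (pvEIdx n ++ (pvOIdx n).reverse)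
            (PySem.Int.floordiv (PySem.List.len (pvEIdx n ++ (pvOIdx n).reverse)) 2
              + PySem.Int.mod (PySem.List.len (pvEIdx n ++ (pvOIdx n).reverse)) 2) (n : Int)
          = pvEIdx (n + 1) ++ (pvOIdx (n + 1)).reverse := by
        rw [hins, PySem.List.insert_natCast _ _ _ hle, htake, hdrop]
        rcases Nat.even_or_odd n with h | h
        · have h0 : n % 2 = 0 := Nat.even_iff.mp h
          simp [pvEIdx, pvOIdx, h0]
        · have h1 : n % 2 = 1 := Nat.odd_iff.mp h
          simp [pvEIdx, pvOIdx, h1]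
      simp only [hinsert]
      simp
      omega

-- mapping A's index lists over `documents` gives the parity split
lemma pvMapIdx (documents : List Int) (n : Nat) (hn : n ≤ documents.length) :
    (pvEIdx n).map (fun idx => PySem.List.pyGetD documents idx 0) = (pvSplit (documents.take n)).1
    ∧ (pvOIdx n).map (fun idx => PySem.List.pyGetD documents idx 0) = (pvSplit (documents.take n)).2 := by
  induction n with
  | zero => simp [pvEIdx, pvOIdx, pvSplit]
  | succ n ih =>
    obtain ⟨ihe, iho⟩ := ih (by omega)
    have hn' : n < documents.length := by omega
    have htake : documents.take (n + 1) = documents.take n ++ [documents[n]] :=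
      List.take_succ_eq_append_getElem hn'
    have hget : PySem.List.pyGetD documents ((n : Nat) : Int) 0 = documents[n] := by
      simp [List.getD_eq_getElem?_getD, hn']
    have hlen : (documents.take n).length = n := List.length_take_of_le (by omega)
    rw [htake, pvSplit_append_singleton, hlen]
    rcases Nat.even_or_odd n with h | h
    · have h0 : n % 2 = 0 := Nat.even_iff.mp h
      constructor
      · simp [pvEIdx, h0, ihe, hget]
      · simp [pvOIdx, h0, iho]
    · have h1 : n % 2 = 1 := Nat.odd_iff.mp h
      constructor
      · simp [pvEIdx, h1, ihe]
      · simp [pvOIdx, h1, iho, hget]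

-- B's fold invariant
lemma pvFoldB (xs : List Int) : ∀ (s : Int) (L R : List Int), 0 ≤ s →
    (PySem.List.enumerate xs s).foldl
      (fun (st : List Int × List Int) p =>
        if PySem.Int.mod p.1 2 = 0 then (st.1 ++ [p.2], st.2) else (st.1, st.2 ++ [p.2]))
      (L, R)
    = (if PySem.Int.mod s 2 = 0 then (L ++ (pvSplit xs).1, R ++ (pvSplit xs).2)
       else (L ++ (pvSplit xs).2, R ++ (pvSplit xs).1)) := by
  induction xs with
  | nil => intro s L R hs; simp [PySem.List.enumerate_nil, pvSplit]
  | cons a l ih =>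
    intro s L R hs
    rw [PySem.List.enumerate_cons, List.foldl_cons]
    have hmod : PySem.Int.mod (s + 1) 2 = if PySem.Int.mod s 2 = 0 then 1 else 0 := by
      simp only [PySem.Int.mod_eq_emod_of_pos (by omega : (0:Int) < 2)]
      split_ifs <;> omega
    rcases eq_or_ne (PySem.Int.mod s 2) 0 with h | h
    · rw [if_pos h, ih (s + 1) _ _ (by omega),
        if_neg (by rw [hmod, if_pos h]; omega), if_pos h]
      simp [pvSplit]
    · rw [if_neg h, ih (s + 1) _ _ (by omega),
        if_pos (by rw [hmod, if_neg h]), if_neg h]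
      simp [pvSplit]

lemma pvAltEq (documents : List Int) :
    litm_alt documents = (pvSplit documents).1 ++ (pvSplit documents).2.reverse := by
  unfold litm_alt
  rw [pvFoldB documents 0 [] [] (by omega)]
  simp [PySem.Int.mod]

-- ===== VERDICT (by name: the statement is the Claim_ definition above) =====
theorem litm_spec : Claim_equal_litm := by
  intro documents _ hpre
  unfold Spec_litm litm
  rw [pvAltEq]
  have hlen : 1 ≤ documents.length := by
    cases documents with
    | nil => exact absurd rfl hpre
    | cons a l => simp
  by_cases h1 : documents.length = 1
  · -- singleton: A returns the list unchanged
    simp only [PySem.List.len_eq, h1]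
    obtain ⟨a, rfl⟩ : ∃ a, documents = [a] := by
      cases documents with
      | nil => simp at h1
      | cons a l => cases l with
        | nil => exact ⟨a, rfl⟩
        | cons b l' => simp at h1
    simp [pvSplit]
  · have hne : (PySem.List.len documents : Int) ≠ 1 := by
      simp only [PySem.List.len_eq]; exact_mod_cast h1
    simp only [if_neg hne]
    have hpos : (0 : Int) < (documents.length : Int) := by exact_mod_cast hlen
    have htail : PySem.List.slice (PySem.List.pyRange 0 (PySem.List.len documents) 1) (some 1) none
        = PySem.List.pyRange 1 (documents.length : Int) 1 := by
      rw [PySem.List.slice_from_one, PySem.List.len_eq,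
        PySem.List.pyRange_one_cons hpos]
      rfl
    rw [htail, pvFoldA documents documents.length hlen]
    have hn1 : ¬ (documents.length = 1) := h1
    simp only [if_neg hn1, Option.getD_some, List.map_append, List.map_reverse]
    obtain ⟨he, ho⟩ := pvMapIdx documents documents.length (le_refl _)
    rw [he, ho, List.take_length]

theorem litm_raises : Claim_raises_litm := by
  unfold Claim_raises_litm
  exact ⟨fun documents _ hr hp => hp hr, by decide⟩

-- witness self-check: B's port really returns the stated value on the raise witness
theorem pvRaiseWitness_ok : litm_alt pvRaiseWitness_litm = pvRaiseWitnessOut_litm := by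
  have h := litm_raises
  unfold Claim_raises_litm at h
  exact h.2.2.2
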